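-- pv_equiv track=rewrite | github.com/lsspkk/sudoku | src/diff.py | parse_grids
-- ===== SOURCE A (Python) =====
-- def parse_grids(txt):
--     grids = []
--     grid = []
--     for line in txt.splitlines():
--         line = line.strip()
--         if line.startswith('Grid'):
--             if grid:
--                 grids.append(grid)
--                 grid = []
--         elif line.startswith('|'):
--             cells = [c for c in line[1:-1].split('|')]
--             row = []
--             for block in cells:
--                 row += [x for x in block.strip().split(' ') if x]
--             if row:
--                 grid.append(row)
--     if grid:
--         grids.append(grid)
--     return grids
-- ===== SOURCE B (Python) =====
-- def row_of(line):
--     return [x for block in line[1:-1].split('|') for x in block.strip().split(' ') if x]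
--
-- def grid_of(seg):
--     return [r for r in (row_of(l) for l in seg if l.startswith('|')) if r]
--
-- def parse_grids(txt):
--     lines = [l.strip() for l in txt.splitlines()]
--     n = len(lines)
--     marks = [i for i, l in enumerate(lines) if l.startswith('Grid')]
--     starts = [0] + [m + 1 for m in marks]
--     ends = marks + [n]
--     return [g for g in (grid_of(lines[s:e]) for s, e in zip(starts, ends)) if g]
-- ===== Notes on version B (the rewrite author's own statement) =====
-- stated objective: alternative
-- what changed: Replaced A's streaming accumulate-and-flush state machine with an index-based batch plan: first compute the positions of all grid-marker lines with enumerate, derive segment boundaries by index arithmetic (zip of starts and ends), slice the line list at those boundaries, and map each slice through an independent grid parser, keeping non-empty grids.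
import Mathlib
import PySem

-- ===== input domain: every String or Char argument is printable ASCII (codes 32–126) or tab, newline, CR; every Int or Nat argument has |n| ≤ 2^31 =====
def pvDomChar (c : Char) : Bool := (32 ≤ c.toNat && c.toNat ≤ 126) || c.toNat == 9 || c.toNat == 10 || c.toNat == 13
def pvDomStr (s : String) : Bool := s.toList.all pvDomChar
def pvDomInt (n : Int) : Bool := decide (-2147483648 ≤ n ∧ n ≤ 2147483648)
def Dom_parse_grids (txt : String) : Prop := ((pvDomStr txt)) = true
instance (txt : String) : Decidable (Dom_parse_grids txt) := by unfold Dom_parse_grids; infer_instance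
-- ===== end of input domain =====

-- B replaces A's incremental accumulate-and-flush state machine with an index-based
-- plan: compute 'Grid' marker positions via enumerate, derive segment boundaries by
-- index arithmetic, slice the line list, and parse each slice independently;
-- objective: alternative structure, same cost.


-- ===== PORT A =====
-- literal transliteration of A: one fold over the lines with state (grids, grid),
-- flushing the current grid at each 'Grid' marker and at the end.
def parse_grids (txt : String) : List (List (List String)) :=
  let st := (PySem.Str.splitlines txt).foldl
    (fun (st : List (List (List String)) × List (List String)) line0 =>
      let line := PySem.Str.strip line0
      if PySem.Str.startswith line "Grid" then
        if st.2.isEmpty then st else (st.1 ++ [st.2], [])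
      else if PySem.Str.startswith line "|" then
        let cells := (PySem.Str.split? (PySem.Str.slice line (some 1) (some (-1))) "|").getD []
        let row := cells.foldl
          (fun r block =>
            r ++ ((PySem.Str.split? (PySem.Str.strip block) " ").getD []).filter (fun x => x != ""))
          []
        if row.isEmpty then st else (st.1, st.2 ++ [row])
      else st)
    ([], [])
  if st.2.isEmpty then st.1 else st.1 ++ [st.2]

-- ===== PORT B =====
-- B-side helper: row_of — the cell logic of one '|' line
def pvRowOf (line : String) : List String :=
  ((PySem.Str.split? (PySem.Str.slice line (some 1) (some (-1))) "|").getD []).flatMap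
    (fun block => ((PySem.Str.split? (PySem.Str.strip block) " ").getD []).filter (fun x => x != ""))

-- B-side helper: grid_of — the non-empty rows of a segment's '|' lines
def pvGridOf (seg : List String) : List (List String) :=
  ((seg.filter (fun l => PySem.Str.startswith l "|")).map pvRowOf).filter (fun r => !r.isEmpty)

-- transliteration of B: strip all lines; find the indices of the 'Grid' marker lines
-- with enumerate; form the segment boundary pairs (starts, ends) by index arithmetic;
-- slice the line list at each pair, parse each slice, keep the non-empty grids.
def parse_grids_alt (txt : String) : List (List (List String)) :=
  let lines := (PySem.Str.splitlines txt).map PySem.Str.strip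
  let n : Int := lines.length
  let marks := ((PySem.List.enumerate lines).filter
      (fun p => PySem.Str.startswith p.2 "Grid")).map (fun p => p.1)
  let starts := 0 :: marks.map (· + 1)
  let ends := marks ++ [n]
  ((starts.zip ends).map
      (fun p => pvGridOf (PySem.List.slice lines (some p.1) (some p.2)))).filter
    (fun g => !g.isEmpty)

-- ===== PRECONDITION & SPEC =====
def Spec_parse_grids (txt : String) (out : List (List (List String))) : Prop := out = parse_grids_alt txt
instance (txt : String) (out : List (List (List String))) : Decidable (Spec_parse_grids txt out) := by unfold Spec_parse_grids; infer_instance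

-- ===== CLAIM (what is proved, stated in full; the proofs are below) =====
def Claim_equal_parse_grids : Prop := ∀ (txt : String), Dom_parse_grids txt → Spec_parse_grids txt (parse_grids txt)

-- ===== LEMMAS AND PROOFS =====

-- the segments of a line list, cut at (and dropping) the 'Grid' marker lines
def pvSplit : List String → List (List String)
  | [] => [[]]
  | l :: ls =>
    if PySem.Str.startswith l "Grid" then [] :: pvSplit ls
    else match pvSplit ls with
         | [] => [[l]]
         | s :: rest => (l :: s) :: rest

-- the marker indices, as naturals
def pvMarks : List String → List Nat
  | [] => []
  | l :: ls =>
    if PySem.Str.startswith l "Grid" then 0 :: (pvMarks ls).map (· + 1)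
    else (pvMarks ls).map (· + 1)

-- the drop/take form of B's boundary slicing
def pvCut (ls : List String) (m : List Nat) : List (List String) :=
  ((0 :: m.map (· + 1)).zip (m ++ [ls.length])).map (fun p => (ls.drop p.1).take (p.2 - p.1))

lemma pvSplit_ne_nil (ls : List String) : pvSplit ls ≠ [] := by
  cases ls with
  | nil => simp [pvSplit]
  | cons l ls =>
    simp only [pvSplit]
    split
    · simp
    · split <;> simp

-- shifting every boundary by one and consing a line leaves each piece's body intact
lemma pv_zip_shift (as bs : List Nat) (l : String) (ls : List String) :
    ((as.map (· + 1)).zip (bs.map (· + 1))).map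
        (fun p => ((l :: ls).drop p.1).take (p.2 - p.1))
      = (as.zip bs).map (fun p => (ls.drop p.1).take (p.2 - p.1)) := by
  induction as generalizing bs with
  | nil => simp
  | cons a as ih =>
    cases bs with
    | nil => simp
    | cons b bs => simp [ih, Nat.add_sub_add_right]

lemma pvCut_shift (l : String) (ls : List String) (m : List Nat) :
    pvCut (l :: ls) (m.map (· + 1)) =
      match pvCut ls m with
      | [] => []
      | s :: r => (l :: s) :: r := by
  obtain ⟨e, er, he⟩ : ∃ e er, m ++ [ls.length] = e :: er := by
    cases m <;> simp
  have h2 : (m.map (· + 1)) ++ [(l :: ls).length] = (e + 1) :: er.map (· + 1) := by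
    have : (m.map (· + 1)) ++ [(l :: ls).length] = (m ++ [ls.length]).map (· + 1) := by
      simp
    rw [this, he]; simp
  unfold pvCut
  rw [h2, he]
  simp only [List.zip_cons_cons, List.map_cons, List.drop_zero, Nat.sub_zero,
    List.take_succ_cons]
  rw [pv_zip_shift]

-- B's boundary slicing at the marker indices produces exactly the marker-cut segments
lemma pvCut_marks (ls : List String) : pvCut ls (pvMarks ls) = pvSplit ls := by
  induction ls with
  | nil => simp [pvCut, pvSplit, pvMarks]
  | cons l ls ih =>
    by_cases h : PySem.Str.startswith l "Grid"
    · have hm : pvMarks (l :: ls) = 0 :: (pvMarks ls).map (· + 1) := by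
        simp only [pvMarks]; rw [if_pos h]
      have hends : ((pvMarks ls).map (· + 1)) ++ [(l :: ls).length]
          = ((pvMarks ls) ++ [ls.length]).map (· + 1) := by simp
      have hstarts : ((1 : Nat) :: ((pvMarks ls).map (· + 1)).map (· + 1))
          = ((0 : Nat) :: (pvMarks ls).map (· + 1)).map (· + 1) := by simp
      rw [hm]
      unfold pvCut
      simp only [List.map_cons, List.cons_append, List.zip_cons_cons, List.map_cons]
      rw [hstarts, hends, pv_zip_shift]
      simp only [pvSplit]; rw [if_pos h]
      exact congrArg _ ih
    · have hm : pvMarks (l :: ls) = (pvMarks ls).map (· + 1) := by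
        simp only [pvMarks]; rw [if_neg h]
      rw [hm, pvCut_shift, ih]
      simp only [pvSplit]; rw [if_neg h]
      cases hs : pvSplit ls with
      | nil => exact absurd hs (pvSplit_ne_nil ls)
      | cons s r => simp
-- the enumerate/filter/map marker computation equals pvMarks, shifted by the start
lemma pv_enum_marks (ls : List String) (s : Int) :
    (((PySem.List.enumerate ls s).filter
        (fun p => PySem.Str.startswith p.2 "Grid")).map (fun p => p.1))
      = (pvMarks ls).map (fun k : Nat => s + (k : Int)) := by
  induction ls generalizing s with
  | nil => simp [PySem.List.enumerate_nil, pvMarks]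
  | cons l ls ih =>
    rw [PySem.List.enumerate_cons]
    simp only [pvMarks]
    by_cases h : PySem.Str.startswith l "Grid"
    · rw [if_pos h, List.filter_cons_of_pos (by simpa using h), List.map_cons, ih,
        List.map_cons, List.map_map]
      congr 1
      · simp
      · apply List.map_congr_left; intro k _
        simp only [Function.comp_apply]; push_cast; ring
    · rw [if_neg h, List.filter_cons_of_neg (by simpa using h), ih, List.map_map]
      apply List.map_congr_left; intro k _
      simp only [Function.comp_apply]; push_cast; ring

-- B's Int-indexed slice plan computes the drop/take cut at the natural marker indices
lemma pv_alt_eq_cut (lines : List String) :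
    ((((0 : Int) :: ((((PySem.List.enumerate lines 0).filter
            (fun p => PySem.Str.startswith p.2 "Grid")).map (fun p => p.1)).map (· + 1))).zip
        (((PySem.List.enumerate lines 0).filter
            (fun p => PySem.Str.startswith p.2 "Grid")).map (fun p => p.1) ++ [(lines.length : Int)])).map
      (fun p => pvGridOf (PySem.List.slice lines (some p.1) (some p.2))))
    = (pvCut lines (pvMarks lines)).map pvGridOf := by
  rw [pv_enum_marks]
  have hcast : (pvMarks lines).map (fun k : Nat => (0 : Int) + (k : Int))
      = (pvMarks lines).map (fun k : Nat => (k : Int)) := by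
    apply List.map_congr_left; intro k _; ring
  rw [hcast]
  have hstarts : ((0 : Int) :: ((pvMarks lines).map (fun k : Nat => (k : Int))).map (· + 1))
      = ((0 : Nat) :: (pvMarks lines).map (· + 1)).map (fun k : Nat => (k : Int)) := by
    simp [List.map_map, Function.comp]
  have hends : ((pvMarks lines).map (fun k : Nat => (k : Int)) ++ [(lines.length : Int)])
      = ((pvMarks lines) ++ [lines.length]).map (fun k : Nat => (k : Int)) := by
    simp
  rw [hstarts, hends, List.zip_map]
  unfold pvCut
  rw [List.map_map, List.map_map]
  apply List.map_congr_left
  rintro ⟨a, b⟩ _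
  simp only [Function.comp_apply, Prod.map_apply]
  rw [PySem.List.slice_natCast]

-- pvGridOf distributes over appending one line to a segment
lemma pvGridOf_append_one (cur : List String) (l : String) :
    pvGridOf (cur ++ [l]) =
      pvGridOf cur ++
        (if PySem.Str.startswith l "|" then
          (if (pvRowOf l).isEmpty then [] else [pvRowOf l]) else []) := by
  by_cases h : PySem.Chars.startswith l.toList ['|'] = true
  · by_cases hr : (pvRowOf l).isEmpty <;>
      simp [pvGridOf, List.filter_append, List.filter, h, hr]
  · simp [pvGridOf, List.filter_append, List.filter, h]

-- filtering the grids of segs ++ [cur] peels the last segment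
lemma pvGrids_append_one (segs : List (List String)) (cur : List String) :
    (((segs ++ [cur]).map pvGridOf).filter (fun g => !g.isEmpty)) =
      ((segs.map pvGridOf).filter (fun g => !g.isEmpty)) ++
        (if (pvGridOf cur).isEmpty then [] else [pvGridOf cur]) := by
  simp only [List.map_append, List.filter_append, List.map, List.filter]
  by_cases h : (pvGridOf cur).isEmpty <;> simp [h]

-- appending the final grid iff non-empty, as one append
lemma pv_finalize {b : Type} (gs : List b) (g : b) (c : Bool) :
    (if c then gs else gs ++ [g]) = gs ++ (if c then [] else [g]) := by
  cases c <;> simp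

-- the loop invariant: A's fold state is the image of the marker-grouping fold state
set_option maxHeartbeats 1000000 in
lemma pv_key (ls : List String) (segs : List (List String)) (cur : List String) :
    ls.foldl
      (fun (st : List (List (List String)) × List (List String)) line0 =>
        let line := PySem.Str.strip line0
        if PySem.Str.startswith line "Grid" then
          if st.2.isEmpty then st else (st.1 ++ [st.2], [])
        else if PySem.Str.startswith line "|" then
          let cells := (PySem.Str.split? (PySem.Str.slice line (some 1) (some (-1))) "|").getD []
          let row := cells.foldl
            (fun r block =>
              r ++ ((PySem.Str.split? (PySem.Str.strip block) " ").getD []).filter (fun x => x != ""))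
            []
          if row.isEmpty then st else (st.1, st.2 ++ [row])
        else st)
      ((segs.map pvGridOf).filter (fun g => !g.isEmpty), pvGridOf cur)
    = (let q := ls.foldl
        (fun (st : List (List String) × List String) l0 =>
          let l := PySem.Str.strip l0
          if PySem.Str.startswith l "Grid" then (st.1 ++ [st.2], []) else (st.1, st.2 ++ [l]))
        (segs, cur)
       ((q.1.map pvGridOf).filter (fun g => !g.isEmpty), pvGridOf q.2)) := by
  induction ls generalizing segs cur with
  | nil => rfl
  | cons l0 ls ih =>
    simp only [List.foldl_cons]
    set sl := PySem.Str.strip l0 with hsl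
    by_cases hg : PySem.Str.startswith sl "Grid"
    · simp only [hg, if_true]
      by_cases he : (pvGridOf cur).isEmpty
      · have h2 : pvGridOf cur = [] := by simpa [List.isEmpty_iff] using he
        rw [if_pos he]
        have e : (((segs.map pvGridOf).filter (fun g => !g.isEmpty), pvGridOf cur) :
              List (List (List String)) × List (List String)) =
            ((((segs ++ [cur]).map pvGridOf).filter (fun g => !g.isEmpty)),
              pvGridOf ([] : List String)) := by
          rw [pvGrids_append_one]; simp [h2]; rfl
        rw [e]
        exact ih (segs ++ [cur]) []
      · rw [if_neg he]
        have e : (((segs.map pvGridOf).filter (fun g => !g.isEmpty) ++ [pvGridOf cur],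
              ([] : List (List String))) :
              List (List (List String)) × List (List String)) =
            ((((segs ++ [cur]).map pvGridOf).filter (fun g => !g.isEmpty)),
              pvGridOf ([] : List String)) := by
          rw [pvGrids_append_one]; simp [he]; rfl
        rw [e]
        exact ih (segs ++ [cur]) []
    · simp only [hg]
      by_cases hp : PySem.Str.startswith sl "|"
      · simp only [hp, if_true]
        have hrow : (((PySem.Str.split? (PySem.Str.slice sl (some 1) (some (-1))) "|").getD []).foldl
            (fun r block =>
              r ++ ((PySem.Str.split? (PySem.Str.strip block) " ").getD []).filter (fun x => x != ""))
            []) = pvRowOf sl := by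
          rw [PySem.List.foldl_append_eq_flatMap, List.nil_append, pvRowOf]
        rw [hrow]
        have hcur : pvGridOf (cur ++ [sl]) =
            pvGridOf cur ++ (if (pvRowOf sl).isEmpty then [] else [pvRowOf sl]) := by
          rw [pvGridOf_append_one, if_pos hp]
        by_cases hre : (pvRowOf sl).isEmpty
        · rw [if_pos hre]
          have e : (((segs.map pvGridOf).filter (fun g => !g.isEmpty), pvGridOf cur) :
                List (List (List String)) × List (List String)) =
              ((segs.map pvGridOf).filter (fun g => !g.isEmpty), pvGridOf (cur ++ [sl])) := by
            rw [hcur]; simp [hre]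
          rw [e]
          exact ih segs (cur ++ [sl])
        · rw [if_neg hre]
          have e : (((segs.map pvGridOf).filter (fun g => !g.isEmpty),
                pvGridOf cur ++ [pvRowOf sl]) :
                List (List (List String)) × List (List String)) =
              ((segs.map pvGridOf).filter (fun g => !g.isEmpty), pvGridOf (cur ++ [sl])) := by
            rw [hcur]; simp [hre]
          rw [e]
          exact ih segs (cur ++ [sl])
      · simp only [hp]
        have e : (((segs.map pvGridOf).filter (fun g => !g.isEmpty), pvGridOf cur) :
              List (List (List String)) × List (List String)) =
            ((segs.map pvGridOf).filter (fun g => !g.isEmpty), pvGridOf (cur ++ [sl])) := by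
          rw [pvGridOf_append_one, if_neg hp]; simp
        rw [e]
        exact ih segs (cur ++ [sl])

-- the grouping fold's final segments are exactly the marker-cut segments
lemma pv_fold_split (ls : List String) (segs : List (List String)) (cur : List String) :
    (let q := ls.foldl
        (fun (st : List (List String) × List String) l0 =>
          let l := PySem.Str.strip l0
          if PySem.Str.startswith l "Grid" then (st.1 ++ [st.2], []) else (st.1, st.2 ++ [l]))
        (segs, cur)
     q.1 ++ [q.2])
    = segs ++ (match pvSplit (ls.map PySem.Str.strip) with
               | [] => [cur]
               | s :: r => (cur ++ s) :: r) := by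
  induction ls generalizing segs cur with
  | nil => simp [pvSplit]
  | cons l0 ls ih =>
    simp only [List.foldl_cons, List.map_cons]
    by_cases hg : PySem.Str.startswith (PySem.Str.strip l0) "Grid"
    · simp only [hg, if_true]
      rw [ih (segs ++ [cur]) []]
      simp only [pvSplit]; rw [if_pos hg]
      cases hs : pvSplit (ls.map PySem.Str.strip) with
      | nil => exact absurd hs (pvSplit_ne_nil _)
      | cons s r => simp
    · simp only [hg, Bool.false_eq_true, if_false]
      rw [ih segs (cur ++ [PySem.Str.strip l0])]
      simp only [pvSplit]; rw [if_neg hg]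
      cases hs : pvSplit (ls.map PySem.Str.strip) with
      | nil => exact absurd hs (pvSplit_ne_nil _)
      | cons s r => simp

-- ===== VERDICT (by name: the statement is the Claim_ definition above) =====
set_option maxHeartbeats 1000000 in
theorem parse_grids_spec : Claim_equal_parse_grids := by
  intro txt _
  show parse_grids txt = parse_grids_alt txt
  unfold parse_grids parse_grids_alt
  have h1 := pv_key (PySem.Str.splitlines txt) [] []
  have hGridNil : pvGridOf [] = [] := rfl
  simp only [List.map_nil, List.filter_nil, hGridNil] at h1
  simp only [h1]
  have h2 := pv_fold_split (PySem.Str.splitlines txt) [] []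
  simp only [List.nil_append] at h2
  have h3 := pv_alt_eq_cut ((PySem.Str.splitlines txt).map PySem.Str.strip)
  rw [pvCut_marks] at h3
  -- both sides are the filtered grids of the marker-cut segments
  rw [pv_finalize, ← pvGrids_append_one]
  rw [h2]
  rw [h3]
  cases hs : pvSplit ((PySem.Str.splitlines txt).map PySem.Str.strip) with
  | nil => exact absurd hs (pvSplit_ne_nil _)
  | cons s r => simp
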